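-- pv_equiv track=rewrite | github.com/ThiernoABah/AAGA-PropertyChecker | PropertyCheck/algorithms/RemyProjet.py | gen_perms
-- ===== SOURCE A (Python) =====
-- def gen_perms(n: int, i: int) -> [[]]:
--     if n < i:
--         return [[]]
--     elements = gen_perms(n, i + 1)
--     res = []
--     for i in range(i):
--         for ele in elements:
--             tmp = ele.copy()
--             tmp.insert(0, i)
--             res.append(tmp)
--     return res
-- ===== SOURCE B (Python) =====
-- def gen_perms(n: int, i: int) -> [[]]:
--     res = [[]]
--     for k in range(n, i - 1, -1):
--         res = [[v] + t for v in range(k) for t in res]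
--     return res
-- ===== Notes on version B (the rewrite author's own statement) =====
-- stated objective: idiomatic
-- what changed: Replaces the recursion with insert(0) and nested append loops by an iterative build from the innermost level outward: a single loop over k = n..i that prepends each v in range(k) to every partial sequence via a list comprehension.
-- outside the precondition, e.g. on gen_perms(0, -950): A returns [], B returns []
import Mathlib
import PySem

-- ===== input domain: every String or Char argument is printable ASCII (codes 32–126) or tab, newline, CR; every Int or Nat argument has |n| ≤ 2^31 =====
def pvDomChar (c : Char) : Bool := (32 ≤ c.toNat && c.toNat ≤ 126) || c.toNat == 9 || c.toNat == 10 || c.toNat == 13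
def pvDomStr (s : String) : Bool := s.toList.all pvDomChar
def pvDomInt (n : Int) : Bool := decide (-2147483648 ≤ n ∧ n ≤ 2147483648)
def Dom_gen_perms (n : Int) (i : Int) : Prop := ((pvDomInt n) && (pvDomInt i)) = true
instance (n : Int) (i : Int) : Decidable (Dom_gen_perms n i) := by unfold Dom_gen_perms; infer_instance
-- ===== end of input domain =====

-- B replaces A's recursion-with-insert(0) by an iterative innermost-to-outermost build (same cost); equivalence is total.

-- ===== PORT A =====
def gen_perms (n : Int) (i : Int) : List (List Int) :=
  if n < i then [[]]
  else
    let elements := gen_perms n (i + 1)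
    (PySem.List.pyRange 0 i 1).foldl
      (fun res j => elements.foldl (fun res ele => res ++ [j :: ele]) res)
      []
termination_by (n + 1 - i).toNat
decreasing_by omega

-- ===== PORT B =====
def gen_perms_alt (n : Int) (i : Int) : List (List Int) :=
  (PySem.List.pyRange n (i - 1) (-1)).foldl
    (fun res k => (PySem.List.pyRange 0 k 1).flatMap (fun v => res.map (fun t => v :: t)))
    [[]]

-- ===== PRECONDITION & SPEC =====
-- Pre_ excludes deeply nested inputs (n - i > 900): close to CPython's default recursion
-- limit of 1000 A raises RecursionError (the exact failing depth depends on the caller's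
-- stack, so a safety margin is kept; in the excluded band A may still return, e.g. (0, -950) -> []).
def Pre_gen_perms (n : Int) (i : Int) : Prop := n - i ≤ 900
instance (n : Int) (i : Int) : Decidable (Pre_gen_perms n i) := by unfold Pre_gen_perms; infer_instance
def pvWitness_gen_perms : Int × Int := (4, 2)

def Spec_gen_perms (n : Int) (i : Int) (out : List (List Int)) : Prop := out = gen_perms_alt n i
instance (n : Int) (i : Int) (out : List (List Int)) : Decidable (Spec_gen_perms n i out) := by unfold Spec_gen_perms; infer_instance

-- ===== CLAIM (what is proved, stated in full; the proofs are below) =====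
def Claim_equal_gen_perms : Prop := ∀ (n : Int) (i : Int), Dom_gen_perms n i → Pre_gen_perms n i → Spec_gen_perms n i (gen_perms n i)

-- ===== LEMMAS AND PROOFS =====

-- splitting off the last (outermost) level of B's countdown range
theorem pv_range_split (n i : Int) (h : i ≤ n) :
    PySem.List.pyRange n (i - 1) (-1) = PySem.List.pyRange n i (-1) ++ [i] := by
  rw [PySem.List.pyRange_neg_one_eq_reverse, PySem.List.pyRange_neg_one_eq_reverse]
  have h1 : i - 1 + 1 = i := by omega
  rw [h1, PySem.List.pyRange_one_cons (by omega : i < n + 1)]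
  simp

theorem pv_main (m : Nat) (n i : Int) (hm : (n + 1 - i).toNat = m) :
    gen_perms n i = gen_perms_alt n i := by
  induction m generalizing i with
  | zero =>
    have hlt : n < i := by omega
    rw [gen_perms]
    simp only [if_pos hlt]
    unfold gen_perms_alt
    rw [PySem.List.pyRange_neg_one_eq_nil (by omega : n ≤ i - 1)]
    rfl
  | succ m ih =>
    by_cases hlt : n < i
    · rw [gen_perms]
      simp only [if_pos hlt]
      unfold gen_perms_alt
      rw [PySem.List.pyRange_neg_one_eq_nil (by omega : n ≤ i - 1)]
      rfl
    · have hle : i ≤ n := by omega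
      rw [gen_perms]
      simp only [if_neg hlt]
      have hrec : gen_perms n (i + 1) = gen_perms_alt n (i + 1) := ih (i + 1) (by omega)
      -- A's nested loops = flatMap of prepend
      have hA : (PySem.List.pyRange 0 i 1).foldl
          (fun res j => (gen_perms n (i + 1)).foldl (fun res ele => res ++ [j :: ele]) res) []
          = (PySem.List.pyRange 0 i 1).flatMap
              (fun j => (gen_perms n (i + 1)).map (fun ele => j :: ele)) := by
        simp only [PySem.List.foldl_append_singleton_eq_map]
        simpa using PySem.List.foldl_append_eq_flatMap
          (fun j => (gen_perms n (i + 1)).map (fun ele => j :: ele))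
          (PySem.List.pyRange 0 i 1) []
      rw [hA, hrec]
      -- unfold B one step from the outside
      show _ = gen_perms_alt n i
      unfold gen_perms_alt
      rw [pv_range_split n i hle, List.foldl_append]
      have h2 : i + 1 - 1 = i := by omega
      simp only [List.foldl_cons, List.foldl_nil, h2]

-- ===== VERDICT (by name: the statement is the Claim_ definition above) =====
theorem gen_perms_spec : Claim_equal_gen_perms := by
  intro n i _ _
  unfold Spec_gen_perms
  exact pv_main (n + 1 - i).toNat n i rfl
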